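-- pv_equiv track=rewrite | github.com/giannifer7/soromantic | scripts/src/soromantic_utils/migrations/add_has_video_column.py | get_best_resolution
-- ===== SOURCE A (Python) =====
-- def get_best_resolution(resolutions: list[int], preferences: list[int]) -> int | None:
--     if not resolutions:
--         return None
--
--     available = set(resolutions)
--
--     # Try preferred resolutions in order
--     for pref in preferences:
--         if pref in available:
--             return pref
--
--     # Fallback to max resolution if none of the preferences match
--     # (Though typically one would match if preferences covers all bases, but good to be safe)
--     return max(resolutions)
-- ===== SOURCE B (Python) =====
-- def get_best_resolution(resolutions: list[int], preferences: list[int]) -> int | None: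
--     if not resolutions:
--         return None
--
--     # Invert the driving loop: map each preference value to its FIRST index once,
--     # then pick the available resolution with the smallest rank.
--     rank = {}
--     for i, p in enumerate(preferences):
--         rank.setdefault(p, i)
--
--     candidates = [r for r in resolutions if r in rank]
--     if candidates:
--         return min(candidates, key=lambda r: rank[r])
--     return max(resolutions)
-- ===== Notes on version B (the rewrite author's own statement) =====
-- stated objective: alternative
-- what changed: B inverts the driving loop: it builds a first-index rank table from preferences once and returns the available resolution of minimal rank (falling back to max), instead of scanning preferences with membership tests against a set of resolutions.
import Mathlib
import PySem

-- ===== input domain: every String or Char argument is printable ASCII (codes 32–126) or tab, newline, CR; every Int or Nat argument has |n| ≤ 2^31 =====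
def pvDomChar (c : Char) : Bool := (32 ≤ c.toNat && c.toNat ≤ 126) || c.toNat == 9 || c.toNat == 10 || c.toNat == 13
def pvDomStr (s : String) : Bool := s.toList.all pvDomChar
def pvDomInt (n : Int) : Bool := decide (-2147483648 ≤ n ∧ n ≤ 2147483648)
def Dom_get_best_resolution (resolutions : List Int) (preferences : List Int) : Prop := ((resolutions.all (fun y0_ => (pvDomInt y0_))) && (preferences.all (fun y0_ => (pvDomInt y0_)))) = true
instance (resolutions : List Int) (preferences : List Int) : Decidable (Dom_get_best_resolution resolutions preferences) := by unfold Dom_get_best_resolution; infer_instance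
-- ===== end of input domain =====

-- B inverts the driving loop: a first-index rank table over preferences, then a minimal-rank
-- scan of the resolutions (alternative decomposition, same cost; equivalence proved below).

-- ===== PORT A =====
-- 'for pref in preferences: if pref in available: return pref'
def pvFindPref (available : PySem.Set Int) : List Int → Option Int
  | [] => none
  | p :: rest => if PySem.Set.contains available p then some p else pvFindPref available rest

def get_best_resolution (resolutions : List Int) (preferences : List Int) : Option Int :=
  if resolutions = [] then
    none
  else
    match pvFindPref (PySem.Set.ofList resolutions) preferences with
    | some p => some p
    | none => PySem.List.max? resolutions (fun x => x)

-- ===== PORT B =====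
-- 'for i, p in enumerate(preferences): rank.setdefault(p, i)'
def pvRank (preferences : List Int) : PySem.Dict Int Int :=
  (PySem.List.enumerate preferences 0).foldl
    (fun d ip => d.setdefault ip.2 ip.1) PySem.Dict.empty

-- min(candidates, key=lambda r: rank[r]); rank[r] is total on candidates (all are keys),
-- so the lookup is ported as getD with an unused default.
def get_best_resolution_alt (resolutions : List Int) (preferences : List Int) : Option Int :=
  if resolutions = [] then
    none
  else
    if resolutions.filter (fun r => (pvRank preferences).contains r) ≠ [] then
      PySem.List.min? (resolutions.filter (fun r => (pvRank preferences).contains r))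
        (fun r => (pvRank preferences).getD r 0)
    else
      PySem.List.max? resolutions (fun x => x)

-- ===== PRECONDITION & SPEC =====
def Spec_get_best_resolution (resolutions : List Int) (preferences : List Int) (out : Option Int) : Prop := out = get_best_resolution_alt resolutions preferences
instance (resolutions : List Int) (preferences : List Int) (out : Option Int) : Decidable (Spec_get_best_resolution resolutions preferences out) := by unfold Spec_get_best_resolution; infer_instance

-- ===== CLAIM (what is proved, stated in full; the proofs are below) =====
def Claim_equal_get_best_resolution : Prop := ∀ (resolutions : List Int) (preferences : List Int), Dom_get_best_resolution resolutions preferences → Spec_get_best_resolution resolutions preferences (get_best_resolution resolutions preferences)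

-- ===== LEMMAS AND PROOFS =====

-- The rank-building loop computes the first index of each key.
theorem pv_rank_loop_get? (prefs : List Int) (s : Int) (d : PySem.Dict Int Int) (x : Int) :
    ((PySem.List.enumerate prefs s).foldl (fun d ip => d.setdefault ip.2 ip.1) d).get? x =
      match d.get? x with
      | some v => some v
      | none => (List.idxOf? x prefs).map (fun n => s + (n : Int)) := by
  induction prefs generalizing s d with
  | nil =>
    simp only [PySem.List.enumerate_nil, List.foldl_nil, List.idxOf?_nil]
    cases d.get? x <;> rfl
  | cons p ps ih =>
    rw [PySem.List.enumerate_cons]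
    simp only [List.foldl_cons]
    rw [ih]
    by_cases hx : x = p
    · subst hx
      rw [PySem.Dict.get?_setdefault_self]
      rw [List.idxOf?_cons]
      simp only [beq_self_eq_true]
      cases h : d.get? x <;> simp
    · rw [PySem.Dict.get?_setdefault_of_ne _ _ hx]
      rw [List.idxOf?_cons]
      have hne : (p == x) = false := by simp [Ne.symm hx]
      rw [hne]
      simp only [Bool.false_eq_true, if_false]
      cases h : d.get? x
      · cases h2 : List.idxOf? x ps
        · simp
        · simp
          ring
      · rfl

theorem pv_rank_get? (prefs : List Int) (x : Int) :
    (pvRank prefs).get? x = (List.idxOf? x prefs).map (fun n => (n : Int)) := by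
  unfold pvRank
  rw [pv_rank_loop_get?]
  rw [PySem.Dict.get?_empty]
  simp

theorem pv_rank_contains (prefs : List Int) (x : Int) :
    (pvRank prefs).contains x = true ↔ x ∈ prefs := by
  rw [PySem.Dict.contains_eq_isSome_get?, pv_rank_get?]
  cases h : List.idxOf? x prefs <;>
    simp [← List.isSome_idxOf? (l := prefs) (a := x), h]

theorem pv_rank_getD (prefs : List Int) (x : Int) (n : Nat)
    (h : List.idxOf? x prefs = some n) : (pvRank prefs).getD x 0 = (n : Int) := by
  rw [PySem.Dict.getD_eq_get?_getD, pv_rank_get?, h]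
  rfl

-- A's loop over preferences is find? with the membership predicate.
theorem pv_findPref_eq_find? (res : List Int) (prefs : List Int) :
    pvFindPref (PySem.Set.ofList res) prefs = List.find? (fun p => decide (p ∈ res)) prefs := by
  induction prefs with
  | nil => rfl
  | cons p ps ih =>
    rw [List.find?_cons]
    unfold pvFindPref
    by_cases hp : p ∈ res
    · have hc : PySem.Set.contains (PySem.Set.ofList res) p = true := by
        rw [PySem.Set.contains_iff]; exact (PySem.Set.mem_ofList res p).mpr hp
      rw [hc]
      simp [hp]
    · have hc : PySem.Set.contains (PySem.Set.ofList res) p = false := by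
        rw [Bool.eq_false_iff]
        intro hcon
        exact hp ((PySem.Set.mem_ofList res p).mp ((PySem.Set.contains_iff _ _).mp hcon))
      rw [hc]
      simp only [Bool.false_eq_true, if_false, ih]
      simp [hp]

-- first index of x in l, packaged from idxOf?
theorem pv_idxOf?_of_mem {l : List Int} {x : Int} (h : x ∈ l) :
    ∃ n, List.idxOf? x l = some n := by
  have := (List.isSome_idxOf? (l := l) (a := x)).mpr h
  exact Option.isSome_iff_exists.mp this

-- ===== VERDICT (by name: the statement is the Claim_ definition above) =====
theorem get_best_resolution_spec : Claim_equal_get_best_resolution := by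
  unfold Claim_equal_get_best_resolution
  intro res prefs _
  unfold Spec_get_best_resolution get_best_resolution get_best_resolution_alt
  by_cases hres : res = []
  · simp [hres]
  · rw [if_neg hres, if_neg hres]
    rw [pv_findPref_eq_find?]
    have hcand : res.filter (fun r => (pvRank prefs).contains r)
        = res.filter (fun r => decide (r ∈ prefs)) := by
      apply List.filter_congr
      intro r _
      by_cases hr : r ∈ prefs
      · rw [(pv_rank_contains prefs r).mpr hr]; simp [hr]
      · have : (pvRank prefs).contains r = false := by
          rw [Bool.eq_false_iff]; intro hc; exact hr ((pv_rank_contains prefs r).mp hc)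
        rw [this]; simp [hr]
    cases hF : List.find? (fun p => decide (p ∈ res)) prefs with
    | none =>
      -- no preference is available: candidates is empty, both fall back to max
      have hnil : res.filter (fun r => (pvRank prefs).contains r) = [] := by
        rw [hcand, List.filter_eq_nil_iff]
        intro r hr
        simp only [decide_eq_true_eq]
        intro hrp
        have := (List.find?_eq_none.mp hF) r hrp
        simp [hr] at this
      simp only [hnil]
      simp
    | some p =>
      -- p is the first preference available in res; B's minimal-rank candidate is p
      obtain ⟨hpred, i, hi, hgi, hfirst⟩ := List.find?_eq_some_iff_getElem.mp hF
      have hpres : p ∈ res := by simpa using hpred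
      have hpprefs : p ∈ prefs := hgi ▸ List.getElem_mem hi
      have hpcand : p ∈ res.filter (fun r => (pvRank prefs).contains r) := by
        rw [hcand, List.mem_filter]
        exact ⟨hpres, by simp [hpprefs]⟩
      have hne : res.filter (fun r => (pvRank prefs).contains r) ≠ [] :=
        List.ne_nil_of_mem hpcand
      rw [if_pos hne]
      -- idxOf? p prefs = some i
      obtain ⟨np, hnp⟩ := pv_idxOf?_of_mem hpprefs
      obtain ⟨hnp_lt, hnp_get, hnp_first⟩ := List.idxOf?_eq_some_iff.mp hnp
      have hnpi : np = i := by
        rcases lt_trichotomy np i with h | h | h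
        · exfalso
          have := hfirst np h
          simp only [Bool.not_eq_eq_eq_not, Bool.not_true, decide_eq_false_iff_not] at this
          exact this (hnp_get ▸ hpres)
        · exact h
        · exfalso; exact hnp_first i h hgi
      -- the minimiser m of B equals p
      cases hm : PySem.List.min? (res.filter (fun r => (pvRank prefs).contains r))
          (fun r => (pvRank prefs).getD r 0) with
      | none =>
        exact absurd ((PySem.List.min?_eq_none_iff _ _).mp hm) hne
      | some m =>
        have hmcand := PySem.List.min?_mem hm
        have hmres : m ∈ res := (List.mem_filter.mp (hcand ▸ hmcand)).1
        have hmprefs : m ∈ prefs := by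
          have := (List.mem_filter.mp (hcand ▸ hmcand)).2
          simpa using this
        obtain ⟨nm, hnm⟩ := pv_idxOf?_of_mem hmprefs
        obtain ⟨hnm_lt, hnm_get, _⟩ := List.idxOf?_eq_some_iff.mp hnm
        have hle : (pvRank prefs).getD m 0 ≤ (pvRank prefs).getD p 0 :=
          PySem.List.min?_isMin hm p hpcand
        rw [pv_rank_getD prefs m nm hnm, pv_rank_getD prefs p np hnp] at hle
        have hlen : nm ≤ np := by exact_mod_cast hle
        have hnmi : nm = i := by
          rcases lt_or_eq_of_le hlen with h | h
          · exfalso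
            have := hfirst nm (hnpi ▸ h)
            simp only [Bool.not_eq_eq_eq_not, Bool.not_true, decide_eq_false_iff_not] at this
            exact this (hnm_get ▸ hmres)
          · exact h ▸ hnpi
        have hmp : m = p := by
          subst hnmi
          rw [← hnm_get, ← hgi]
        rw [hmp]
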